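-- pv_equiv track=rewrite | github.com/Kenivia/pysync | pysync/UserPushPull.py | num_shorten
-- ===== SOURCE A (Python) =====
-- def num_shorten(num_list):
--     """Opposite of replace_numbers
--
--     Args:
--         num_list (list): list of numbers
--
--     Returns:
--         list: abbreviated version of num_list e.g 5,6,7 -> 5-7
--     """
--     num_list = sorted([int(i) for i in num_list])
--     # * doesn't have to take in string, can take int too
--     all_segments = []
--     cur_segment = []
--     for i in num_list:
--         if not cur_segment or cur_segment[-1] + 1 == i:
--             cur_segment.append(i)
--         else:
--             all_segments.append(cur_segment)
--             cur_segment = [i]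
--     all_segments.append(cur_segment)
--
--     out = []
--     for i in all_segments:
--         if len(i) >= 3:
--             out.append(str(i[0]) + "-" + str(i[-1]))
--         else:
--             out.extend([str(i) for i in i])
--     return out
-- ===== SOURCE B (Python) =====
-- def _emit(out, start, prev):
--     if prev - start >= 2:
--         out.append(str(start) + "-" + str(prev))
--     elif prev == start:
--         out.append(str(start))
--     else:
--         out.append(str(start))
--         out.append(str(prev))
--
--
-- def num_shorten(num_list):
--     """One pass over the sorted numbers keeping only the current run's
--     endpoints (start, prev); emits output directly, no segment lists."""
--     nums = sorted(int(i) for i in num_list)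
--     out = []
--     start = prev = None
--     for v in nums:
--         if start is None:
--             start = prev = v
--         elif v == prev + 1:
--             prev = v
--         else:
--             _emit(out, start, prev)
--             start = prev = v
--     if start is not None:
--         _emit(out, start, prev)
--     return out
-- ===== Notes on version B (the rewrite author's own statement) =====
-- stated objective: simpler
-- what changed: A builds a list of segment lists in one pass and renders it in a second pass; B does a single pass over the sorted numbers keeping only the current run's endpoints (start, prev) and emits each abbreviation directly, with no intermediate segment lists.
import Mathlib
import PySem

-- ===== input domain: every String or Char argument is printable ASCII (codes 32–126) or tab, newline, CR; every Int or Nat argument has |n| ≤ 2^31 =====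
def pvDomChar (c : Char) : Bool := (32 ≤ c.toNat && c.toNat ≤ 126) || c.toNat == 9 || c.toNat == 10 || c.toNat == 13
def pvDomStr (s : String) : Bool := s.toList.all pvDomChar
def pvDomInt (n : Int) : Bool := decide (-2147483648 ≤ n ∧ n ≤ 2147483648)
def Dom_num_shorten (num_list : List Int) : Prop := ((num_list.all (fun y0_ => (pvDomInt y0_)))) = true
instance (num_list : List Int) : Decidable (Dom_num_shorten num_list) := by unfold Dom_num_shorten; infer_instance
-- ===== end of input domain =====

-- B replaces A's two-pass scheme (build a list of segment lists, then render it) by a single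
-- pass that keeps only the current run's endpoints and emits output directly (objective: simpler).

-- ===== PORT A =====
-- Python: cur_segment[-1] is read only under the guard `cur_segment` (non-empty), so getLastD 0
-- computes the same value there; likewise i[0]/i[-1] are read only under len(i) >= 3.
def num_shorten (num_list : List Int) : List String :=
  let nums := PySem.List.sorted (num_list.map (fun i => i)) (fun x => x)
  let s := nums.foldl
    (fun (s : List (List Int) × List Int) (i : Int) =>
      if s.2 = [] ∨ s.2.getLastD 0 + 1 = i then (s.1, s.2 ++ [i])
      else (s.1 ++ [s.2], [i]))
    (([], []) : List (List Int) × List Int)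
  let allSegments := s.1 ++ [s.2]
  allSegments.foldl
    (fun (out : List String) (sg : List Int) =>
      if 3 ≤ sg.length then
        out ++ [PySem.Int.toStr (sg.headD 0) ++ "-" ++ PySem.Int.toStr (sg.getLastD 0)]
      else out ++ sg.map PySem.Int.toStr)
    []

-- ===== PORT B =====
def emitB (out : List String) (start prev : Int) : List String :=
  if 2 ≤ prev - start then out ++ [PySem.Int.toStr start ++ "-" ++ PySem.Int.toStr prev]
  else if prev = start then out ++ [PySem.Int.toStr start]
  else out ++ [PySem.Int.toStr start, PySem.Int.toStr prev]

def num_shorten_alt (num_list : List Int) : List String :=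
  let nums := PySem.List.sorted num_list (fun x => x)
  let s := nums.foldl
    (fun (s : List String × Option (Int × Int)) (v : Int) =>
      match s.2 with
      | none => (s.1, some (v, v))
      | some (start, prev) =>
        if v = prev + 1 then (s.1, some (start, v))
        else (emitB s.1 start prev, some (v, v)))
    (([], none) : List String × Option (Int × Int))
  match s.2 with
  | none => s.1
  | some (start, prev) => emitB s.1 start prev

-- ===== PRECONDITION & SPEC =====
def Spec_num_shorten (num_list : List Int) (out : List String) : Prop := out = num_shorten_alt num_list
instance (num_list : List Int) (out : List String) : Decidable (Spec_num_shorten num_list out) := by unfold Spec_num_shorten; infer_instance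

-- ===== CLAIM (what is proved, stated in full; the proofs are below) =====
def Claim_equal_num_shorten : Prop := ∀ (num_list : List Int), Dom_num_shorten num_list → Spec_num_shorten num_list (num_shorten num_list)

-- ===== LEMMAS AND PROOFS =====

-- the consecutive run [s, s+1, …, s+n-1]
def seg (s : Int) : Nat → List Int
  | 0 => []
  | n + 1 => s :: seg (s + 1) n

-- what A's second pass appends for one segment
def renderSeg (sg : List Int) : List String :=
  if 3 ≤ sg.length then
    [PySem.Int.toStr (sg.headD 0) ++ "-" ++ PySem.Int.toStr (sg.getLastD 0)]
  else sg.map PySem.Int.toStr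

lemma seg_snoc (n : Nat) : ∀ (s : Int), seg s (n + 1) = seg s n ++ [s + (n : Int)] := by
  induction n with
  | zero => intro s; simp [seg]
  | succ m ih =>
      intro s
      show s :: seg (s + 1) (m + 1) = (s :: seg (s + 1) m) ++ [s + ((m + 1 : Nat) : Int)]
      rw [ih (s + 1)]
      simp; ring_nf

lemma seg_length (n : Nat) : ∀ (s : Int), (seg s n).length = n := by
  induction n with
  | zero => intro s; rfl
  | succ m ih => intro s; simp [seg, ih]

lemma seg_getLastD (s : Int) (n : Nat) : (seg s (n + 1)).getLastD 0 = s + (n : Int) := by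
  rw [seg_snoc]; exact List.getLastD_concat

lemma seg_ne_nil (s : Int) (n : Nat) : seg s (n + 1) ≠ [] := by simp [seg]

lemma emit_eq (bout : List String) (st : Int) (n : Nat) :
    emitB bout st (st + (n : Int)) = bout ++ renderSeg (seg st (n + 1)) := by
  match n with
  | 0 => simp [emitB, renderSeg, seg, PySem.Int.toStr]
  | 1 => simp [emitB, renderSeg, seg]
  | m + 2 =>
      have hlen : (seg st (m + 3)).length = m + 3 := seg_length _ _
      have hhead : (seg st (m + 3)).headD 0 = st := rfl
      have hlast : (seg st (m + 3)).getLastD 0 = st + ((m + 2 : Nat) : Int) :=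
        seg_getLastD st (m + 2)
      rw [emitB, renderSeg, hlen, hhead, hlast]
      rw [if_pos (by push_cast; omega), if_pos (by omega)]

-- the A-side fold step and B-side fold step, named for the invariant lemma
def stepA (s : List (List Int) × List Int) (i : Int) : List (List Int) × List Int :=
  if s.2 = [] ∨ s.2.getLastD 0 + 1 = i then (s.1, s.2 ++ [i])
  else (s.1 ++ [s.2], [i])

def stepB (s : List String × Option (Int × Int)) (v : Int) : List String × Option (Int × Int) :=
  match s.2 with
  | none => (s.1, some (v, v))
  | some (start, prev) =>
    if v = prev + 1 then (s.1, some (start, v))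
    else (emitB s.1 start prev, some (v, v))

def finishB (s : List String × Option (Int × Int)) : List String :=
  match s.2 with
  | none => s.1
  | some (start, prev) => emitB s.1 start prev

lemma main_invariant (ys : List Int) :
    ∀ (alls : List (List Int)) (cur : List Int) (bout : List String) (o : Option (Int × Int)),
      bout = alls.flatMap renderSeg →
      ((cur = [] ∧ o = none) ∨ ∃ st n, cur = seg st (n + 1) ∧ o = some (st, st + (n : Int))) →
      ((ys.foldl stepA (alls, cur)).1 ++ [(ys.foldl stepA (alls, cur)).2]).flatMap renderSeg
        = finishB (ys.foldl stepB (bout, o)) := by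
  induction ys with
  | nil =>
      intro alls cur bout o hb hrel
      rcases hrel with ⟨hc, ho⟩ | ⟨st, n, hc, ho⟩
      · subst hc; subst ho; simp [finishB, hb, renderSeg]
      · subst hc; subst ho
        simp only [List.foldl_nil, finishB, List.flatMap_append, hb]
        rw [emit_eq]; simp
  | cons y ys ih =>
      intro alls cur bout o hb hrel
      simp only [List.foldl_cons]
      rcases hrel with ⟨hc, ho⟩ | ⟨st, n, hc, ho⟩
      · subst hc; subst ho
        rw [show stepA (alls, []) y = (alls, [y]) by simp [stepA],
            show stepB (bout, none) y = (bout, some (y, y)) by rfl]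
        exact ih alls [y] bout (some (y, y)) hb
          (Or.inr ⟨y, 0, by simp [seg], by simp⟩)
      · subst hc; subst ho
        by_cases h : y = st + (n : Int) + 1
        · rw [show stepA (alls, seg st (n + 1)) y = (alls, seg st (n + 1) ++ [y]) by
              unfold stepA; rw [if_pos (Or.inr (by rw [seg_getLastD]; omega))],
            show stepB (bout, some (st, st + (n : Int))) y = (bout, some (st, y)) by
              simp only [stepB]; rw [if_pos (by omega)]]
          have hseg : seg st (n + 1) ++ [y] = seg st (n + 1 + 1) := by
            rw [seg_snoc (n + 1) st]; push_cast; rw [h]; ring_nf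
          rw [hseg]
          exact ih alls (seg st (n + 2)) bout (some (st, y)) hb
            (Or.inr ⟨st, n + 1, rfl, by rw [h]; push_cast; ring_nf⟩)
        · rw [show stepA (alls, seg st (n + 1)) y = (alls ++ [seg st (n + 1)], [y]) by
              unfold stepA
              rw [if_neg (by push Not; exact ⟨seg_ne_nil st n, by rw [seg_getLastD]; omega⟩)],
            show stepB (bout, some (st, st + (n : Int))) y
                = (emitB bout st (st + (n : Int)), some (y, y)) by
              simp only [stepB]; rw [if_neg (by omega)]]
          exact ih (alls ++ [seg st (n + 1)]) [y] (emitB bout st (st + (n : Int)))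
            (some (y, y))
            (by rw [emit_eq, hb]; simp)
            (Or.inr ⟨y, 0, by simp [seg], by simp⟩)

-- ===== VERDICT (by name: the statement is the Claim_ definition above) =====
theorem num_shorten_spec : Claim_equal_num_shorten := by
  intro num_list _
  show num_shorten num_list = num_shorten_alt num_list
  unfold num_shorten num_shorten_alt
  simp only [List.map_id_fun', id]
  have hfold :
      ∀ (l : List (List Int)) (init : List String),
        l.foldl
          (fun (out : List String) (sg : List Int) =>
            if 3 ≤ sg.length then
              out ++ [PySem.Int.toStr (sg.headD 0) ++ "-" ++ PySem.Int.toStr (sg.getLastD 0)]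
            else out ++ sg.map PySem.Int.toStr) init
          = init ++ l.flatMap renderSeg := by
    intro l init
    have : (fun (out : List String) (sg : List Int) =>
        if 3 ≤ sg.length then
          out ++ [PySem.Int.toStr (sg.headD 0) ++ "-" ++ PySem.Int.toStr (sg.getLastD 0)]
        else out ++ sg.map PySem.Int.toStr)
        = fun out sg => out ++ renderSeg sg := by
      funext out sg; rw [renderSeg]; split <;> rfl
    rw [this, PySem.List.foldl_append_eq_flatMap]
  rw [hfold]
  have := main_invariant (PySem.List.sorted num_list (fun x => x)) [] [] [] none rfl
    (Or.inl ⟨rfl, rfl⟩)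
  simp only [List.nil_append]
  exact this
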